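-- pv_equiv track=rewrite | github.com/angelsgrove99-beep/ParadoxModPatcher | src/core/paradox_rules.py | _find_comment
-- ===== SOURCE A (Python) =====
-- def _find_comment(line: str) -> int:
--     """Находит # вне кавычек"""
--     in_quotes = False
--     for i, c in enumerate(line):
--         if c == '"' and (i == 0 or line[i-1] != '\\'):
--             in_quotes = not in_quotes
--         elif c == '#' and not in_quotes:
--             return i
--     return -1
-- ===== SOURCE B (Python) =====
-- def _find_comment(line: str) -> int:
--     """Находит # вне кавычек (two-pass: toggle-quote indices, then parity lookup)"""
--     toggles = [j for j, c in enumerate(line) if c == '"' and (j == 0 or line[j-1] != '\\')]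
--     for i, c in enumerate(line):
--         if c == '#' and sum(1 for t in toggles if t < i) % 2 == 0:
--             return i
--     return -1
-- ===== Notes on version B (the rewrite author's own statement) =====
-- stated objective: alternative
-- what changed: Replaces the fused in_quotes state-machine scan with two passes: first collect the indices of toggling double-quotes, then return the first hash character preceded by an even number of toggles.
import Mathlib
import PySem

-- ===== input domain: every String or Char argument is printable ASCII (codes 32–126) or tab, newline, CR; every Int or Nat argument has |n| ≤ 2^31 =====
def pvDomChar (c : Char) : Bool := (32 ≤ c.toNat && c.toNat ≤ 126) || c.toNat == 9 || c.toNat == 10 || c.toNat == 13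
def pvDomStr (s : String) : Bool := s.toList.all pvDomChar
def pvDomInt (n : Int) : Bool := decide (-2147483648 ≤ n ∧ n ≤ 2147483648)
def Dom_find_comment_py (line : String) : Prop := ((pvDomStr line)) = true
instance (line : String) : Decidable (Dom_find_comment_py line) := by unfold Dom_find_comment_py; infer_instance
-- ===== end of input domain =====

-- B changes the decomposition: a first pass collects toggling-quote indices, a second pass
-- returns the first '#' with an even number of toggles before it (alternative, not faster).


-- ===== PORT A =====
-- A's loop: enumerate with prev char standing for line[i-1] (none ⇔ i == 0)
def findCommentGoA (cs : List Char) (prev : Option Char) (i : Int) (inq : Bool) : Int :=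
  match cs with
  | [] => -1
  | c :: rest =>
    if c = '"' ∧ (prev = none ∨ ¬ prev = some '\\') then
      findCommentGoA rest (some c) (i + 1) (!inq)
    else if c = '#' ∧ inq = false then i
    else findCommentGoA rest (some c) (i + 1) inq

def find_comment_py (line : String) : Int :=
  findCommentGoA line.toList none 0 false

-- ===== PORT B =====
-- first pass: indices of toggling double-quotes
def findCommentToggles (cs : List Char) (prev : Option Char) (i : Int) : List Int :=
  match cs with
  | [] => []
  | c :: rest =>
    if c = '"' ∧ (prev = none ∨ ¬ prev = some '\\') then
      i :: findCommentToggles rest (some c) (i + 1)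
    else findCommentToggles rest (some c) (i + 1)

-- second pass: first '#' preceded by an even number of toggles
def findCommentGoB (cs : List Char) (i : Int) (ts : List Int) : Int :=
  match cs with
  | [] => -1
  | c :: rest =>
    if c = '#' ∧ (ts.countP (fun t => decide (t < i))) % 2 = 0 then i
    else findCommentGoB rest (i + 1) ts

def find_comment_py_alt (line : String) : Int :=
  findCommentGoB line.toList 0 (findCommentToggles line.toList none 0)

-- ===== PRECONDITION & SPEC =====
def Spec_find_comment_py (line : String) (out : Int) : Prop := out = find_comment_py_alt line
instance (line : String) (out : Int) : Decidable (Spec_find_comment_py line out) := by unfold Spec_find_comment_py; infer_instance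

-- ===== CLAIM (what is proved, stated in full; the proofs are below) =====
def Claim_equal_find_comment_py : Prop := ∀ (line : String), Dom_find_comment_py line → Spec_find_comment_py line (find_comment_py line)

-- ===== LEMMAS AND PROOFS =====

theorem toggles_ge (cs : List Char) (prev : Option Char) (i : Int) :
    ∀ t ∈ findCommentToggles cs prev i, i ≤ t := by
  induction cs generalizing prev i with
  | nil => simp [findCommentToggles]
  | cons c rest ih =>
    intro t ht
    unfold findCommentToggles at ht
    split at ht
    · rcases List.mem_cons.mp ht with rfl | ht
      · exact le_refl _
      · exact le_trans (by omega) (ih _ _ t ht)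
    · exact le_trans (by omega) (ih _ _ t ht)

theorem goA_eq_goB (cs : List Char) (prev : Option Char) (i : Int) (inq : Bool)
    (pre : List Int)
    (h1 : ∀ t ∈ pre, t < i)
    (h2 : pre.length % 2 = (if inq then 1 else 0)) :
    findCommentGoA cs prev i inq =
      findCommentGoB cs i (pre ++ findCommentToggles cs prev i) := by
  induction cs generalizing prev i inq pre with
  | nil => simp [findCommentGoA, findCommentGoB]
  | cons c rest ih =>
    by_cases hq : c = '"' ∧ (prev = none ∨ ¬ prev = some '\\')
    · -- toggle branch: c is a toggling quote, hence not '#'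
      have htg : findCommentToggles (c :: rest) prev i
          = i :: findCommentToggles rest (some c) (i + 1) := by
        simp only [findCommentToggles]; rw [if_pos hq]
      have hA : findCommentGoA (c :: rest) prev i inq
          = findCommentGoA rest (some c) (i + 1) (!inq) := by
        simp only [findCommentGoA]; rw [if_pos hq]
      have hB : findCommentGoB (c :: rest) i (pre ++ i :: findCommentToggles rest (some c) (i + 1))
          = findCommentGoB rest (i + 1) (pre ++ i :: findCommentToggles rest (some c) (i + 1)) := by
        simp only [findCommentGoB]
        rw [if_neg]
        rintro ⟨rfl, -⟩
        exact absurd hq.1 (by decide)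
      rw [hA, htg, hB]
      have h1' : ∀ t ∈ pre ++ [i], t < i + 1 := by
        intro t ht
        rcases List.mem_append.mp ht with h | h
        · have := h1 t h; omega
        · simp at h; omega
      have h2' : (pre ++ [i]).length % 2 = (if !inq then 1 else 0) := by
        simp only [List.length_append, List.length_singleton]
        cases inq <;> simp_all <;> omega
      have := ih (some c) (i + 1) (!inq) (pre ++ [i]) h1' h2'
      simpa using this
    · -- non-toggle branch
      have htg : findCommentToggles (c :: rest) prev i
          = findCommentToggles rest (some c) (i + 1) := by
        simp only [findCommentToggles]; rw [if_neg hq]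
      have hcount : (pre ++ findCommentToggles rest (some c) (i + 1)).countP
          (fun t => decide (t < i)) = pre.length := by
        rw [List.countP_append]
        have hp : pre.countP (fun t => decide (t < i)) = pre.length :=
          List.countP_eq_length.mpr (fun t ht => by simpa using h1 t ht)
        have hz : (findCommentToggles rest (some c) (i + 1)).countP
            (fun t => decide (t < i)) = 0 :=
          List.countP_eq_zero.mpr (fun t ht => by
            have := toggles_ge _ _ _ t ht
            simp only [decide_eq_true_eq]; omega)
        omega
      by_cases hc : c = '#' ∧ inq = false
      · -- A returns i; B's parity count is even
        have hA : findCommentGoA (c :: rest) prev i inq = i := by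
          simp only [findCommentGoA]; rw [if_neg hq, if_pos hc]
        have hpar : (pre ++ findCommentToggles rest (some c) (i + 1)).countP
            (fun t => decide (t < i)) % 2 = 0 := by
          rw [hcount]
          rcases hc with ⟨-, rfl⟩
          simpa using h2
        have hB : findCommentGoB (c :: rest) i (pre ++ findCommentToggles rest (some c) (i + 1)) = i := by
          simp only [findCommentGoB]; rw [if_pos ⟨hc.1, hpar⟩]
        rw [hA, htg, hB]
      · -- both recurse
        have hA : findCommentGoA (c :: rest) prev i inq
            = findCommentGoA rest (some c) (i + 1) inq := by
          simp only [findCommentGoA]; rw [if_neg hq, if_neg hc]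
        have hBc : ¬ (c = '#' ∧ (pre ++ findCommentToggles rest (some c) (i + 1)).countP
            (fun t => decide (t < i)) % 2 = 0) := by
          rintro ⟨rfl, hpar⟩
          have hinq : inq = true := by
            cases inq
            · exact absurd ⟨rfl, rfl⟩ hc
            · rfl
          rw [hcount] at hpar
          rw [hinq] at h2
          simp at h2
          omega
        have hB : findCommentGoB (c :: rest) i (pre ++ findCommentToggles rest (some c) (i + 1))
            = findCommentGoB rest (i + 1) (pre ++ findCommentToggles rest (some c) (i + 1)) := by
          simp only [findCommentGoB]; rw [if_neg hBc]
        rw [hA, htg, hB]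
        exact ih (some c) (i + 1) inq pre (fun t ht => by have := h1 t ht; omega) h2

-- ===== VERDICT (by name: the statement is the Claim_ definition above) =====
theorem find_comment_py_spec : Claim_equal_find_comment_py := by
  intro line _
  unfold Spec_find_comment_py find_comment_py find_comment_py_alt
  simpa using goA_eq_goB line.toList none 0 false [] (by simp) (by simp)
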